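-- pv_equiv track=rewrite | github.com/BadrSouani/HInter | tools/methods.py | getChatPattern
-- ===== SOURCE A (Python) =====
-- def getMessagePattern(sender, content):
--     return {"role": sender, "content" :content,}
--
-- def getQuestion():
--     return "Question: "
--
-- def getAnswerString():
--     return "Answer: "
--
-- def getText():
--     return "Text: "
--
-- def getChatPattern( questions, question_pattern_a, question_pattern_b, texts, task=None):
--     index = 0
--     index_question = 0
--     chat = []
--     sender = "user"
--     if task!=None :
--         chat.append(getMessagePattern("system", task))
--     while index != len(texts):
--         if sender == "user":
--             add_text = getQuestion()+question_pattern_a+questions[index_question]+question_pattern_b+"\n"+getText()+texts[index]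
--             index_question += 1
--         else : add_text=getAnswerString()+texts[index]
--         index += 1
--         chat.append(getMessagePattern(sender, add_text))
--         sender = "user" if sender == "assistant" else "assistant"
--     return chat
-- ===== SOURCE B (Python) =====
-- def getMessagePattern(sender, content):
--     return {"role": sender, "content": content}
--
-- def getChatPattern(questions, question_pattern_a, question_pattern_b, texts, task=None):
--     chat = [getMessagePattern("system", task)] if task != None else []
--     # Stage 1: chunk the texts into question/answer pairs (the last chunk may
--     # hold only a question text).  Stage 2: zip each chunk with its question
--     # and emit the one or two messages of that round.
--     rounds = [texts[i:i + 2] for i in range(0, len(texts), 2)]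
--     for question, chunk in zip(questions, rounds):
--         chat.append(getMessagePattern(
--             "user",
--             "Question: " + question_pattern_a + question
--             + question_pattern_b + "\n" + "Text: " + chunk[0]))
--         if len(chunk) == 2:
--             chat.append(getMessagePattern("assistant", "Answer: " + chunk[1]))
--     return chat
-- ===== Notes on version B (the rewrite author's own statement) =====
-- stated objective: alternative
-- what changed: Replaces A's one-message-at-a-time while-loop state machine (index counter, question-index accumulator, sender toggle) by a staged pipeline: first chunk the texts into two-element question/answer rounds, then zip the rounds with the questions and emit each round's one or two messages as a block.
import Mathlib
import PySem

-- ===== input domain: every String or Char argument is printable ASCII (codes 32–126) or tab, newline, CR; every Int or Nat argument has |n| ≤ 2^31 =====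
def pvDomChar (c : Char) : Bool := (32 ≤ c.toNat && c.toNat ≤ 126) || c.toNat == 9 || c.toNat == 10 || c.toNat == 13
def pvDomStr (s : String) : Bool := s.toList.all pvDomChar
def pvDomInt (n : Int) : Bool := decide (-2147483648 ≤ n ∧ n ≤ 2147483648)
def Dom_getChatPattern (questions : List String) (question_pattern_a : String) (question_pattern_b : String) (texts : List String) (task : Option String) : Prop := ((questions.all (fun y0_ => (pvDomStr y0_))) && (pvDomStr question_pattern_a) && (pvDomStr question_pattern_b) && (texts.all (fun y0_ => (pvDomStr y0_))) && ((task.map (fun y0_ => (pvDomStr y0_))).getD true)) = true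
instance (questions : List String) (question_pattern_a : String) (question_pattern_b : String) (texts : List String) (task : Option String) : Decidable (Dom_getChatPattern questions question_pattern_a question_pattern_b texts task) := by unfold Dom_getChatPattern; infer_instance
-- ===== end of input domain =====

-- B replaces A's one-message-at-a-time while-loop state machine (toggle flag, two index
-- counters) by a staged pipeline: chunk the texts into two-element rounds, zip the rounds
-- with the questions, and emit each round's one or two messages as a block (alternative).

-- ===== PORT A =====
-- A's while loop: remaining texts, question index, current sender string.
-- questions[index_question] raises IndexError when out of range; Pre_ excludes that,
-- so the `.getD ""` default is never reached on admitted inputs.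
def getChatPatternLoop (questions : List String) (qa qb : String) :
    List String → Nat → String → List (List (String × String))
  | [], _, _ => []
  | t :: ts, iq, sender =>
    if sender == "user" then
      [("role", sender), ("content",
          "Question: " ++ qa ++ ((PySem.List.pyGet? questions (Int.ofNat iq)).getD "") ++ qb
            ++ "\n" ++ "Text: " ++ t)]
        :: getChatPatternLoop questions qa qb ts (iq + 1)
             (if sender == "assistant" then "user" else "assistant")
    else
      [("role", sender), ("content", "Answer: " ++ t)]
        :: getChatPatternLoop questions qa qb ts iq
             (if sender == "assistant" then "user" else "assistant")

def getChatPattern (questions : List String) (question_pattern_a : String) (question_pattern_b : String) (texts : List String) (task : Option String) : List (List (String × String)) :=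
  (match task with
   | some t => [[("role", "system"), ("content", t)]]
   | none => [])
  ++ getChatPatternLoop questions question_pattern_a question_pattern_b texts 0 "user"

-- ===== PORT B =====
-- Stage 1 of Source B: texts[i:i+2] for i in range(0, len(texts), 2) — chunk into rounds.
def pvRounds : List String → List (List String)
  | [] => []
  | [t] => [[t]]
  | t1 :: t2 :: ts => [t1, t2] :: pvRounds ts

-- Stage 2 of Source B: the one or two messages of a (question, round) pair.
def pvRoundBlock (qa qb : String) (p : String × List String) : List (List (String × String)) :=
  [("role", "user"), ("content",
      "Question: " ++ qa ++ p.1 ++ qb ++ "\n" ++ "Text: " ++ (p.2.headD ""))]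
    :: (if p.2.length = 2 then
          [[("role", "assistant"), ("content", "Answer: " ++ (p.2.getD 1 ""))]]
        else [])

def getChatPattern_alt (questions : List String) (question_pattern_a : String) (question_pattern_b : String) (texts : List String) (task : Option String) : List (List (String × String)) :=
  (match task with
   | some t => [[("role", "system"), ("content", t)]]
   | none => [])
  ++ (questions.zip (pvRounds texts)).flatMap (pvRoundBlock question_pattern_a question_pattern_b)

-- ===== PRECONDITION & SPEC =====
-- Python A raises IndexError on questions[...] when there are fewer questions than
-- user turns; Pre_ excludes exactly those inputs.
def Pre_getChatPattern (questions : List String) (question_pattern_a : String) (question_pattern_b : String) (texts : List String) (task : Option String) : Prop :=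
  (texts.length + 1) / 2 ≤ questions.length
instance (questions : List String) (question_pattern_a : String) (question_pattern_b : String) (texts : List String) (task : Option String) : Decidable (Pre_getChatPattern questions question_pattern_a question_pattern_b texts task) := by unfold Pre_getChatPattern; infer_instance

def pvWitness_getChatPattern : List String × String × String × List String × Option String :=
  (["q1", "q2"], "A ", " B", ["t1", "t2", "t3"], some "sys")

def Spec_getChatPattern (questions : List String) (question_pattern_a : String) (question_pattern_b : String) (texts : List String) (task : Option String) (out : List (List (String × String))) : Prop := out = getChatPattern_alt questions question_pattern_a question_pattern_b texts task
instance (questions : List String) (question_pattern_a : String) (question_pattern_b : String) (texts : List String) (task : Option String) (out : List (List (String × String))) : Decidable (Spec_getChatPattern questions question_pattern_a question_pattern_b texts task out) := by unfold Spec_getChatPattern; infer_instance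

-- ===== CLAIM (what is proved, stated in full; the proofs are below) =====
def Claim_equal_getChatPattern : Prop := ∀ (questions : List String) (question_pattern_a : String) (question_pattern_b : String) (texts : List String) (task : Option String), Dom_getChatPattern questions question_pattern_a question_pattern_b texts task → Pre_getChatPattern questions question_pattern_a question_pattern_b texts task → Spec_getChatPattern questions question_pattern_a question_pattern_b texts task (getChatPattern questions question_pattern_a question_pattern_b texts task)

-- ===== LEMMAS AND PROOFS =====

-- A's loop starting at question index iq on "user" duty equals B's zip/flatMap over the
-- rounds of the remaining texts, paired with questions from index iq on, provided the
-- questions list is long enough for all remaining user turns.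
theorem loop_eq_rounds (questions : List String) (qa qb : String) :
    ∀ (n : Nat) (ts : List String) (iq : Nat), ts.length ≤ n →
      iq + (ts.length + 1) / 2 ≤ questions.length →
      getChatPatternLoop questions qa qb ts iq "user"
        = ((questions.drop iq).zip (pvRounds ts)).flatMap (pvRoundBlock qa qb) := by
  intro n
  induction n with
  | zero =>
    intro ts iq h _
    have : ts = [] := List.length_eq_zero_iff.mp (Nat.le_zero.mp h)
    subst this; simp [getChatPatternLoop, pvRounds]
  | succ n ih =>
    intro ts iq hlen hq
    match ts with
    | [] => simp [getChatPatternLoop, pvRounds]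
    | [t] =>
      have hiq : iq < questions.length := by simp at hq; omega
      rw [List.drop_eq_getElem_cons hiq]
      simp only [getChatPatternLoop, pvRounds, List.zip_cons_cons, List.zip_nil_right,
        List.flatMap_cons, List.flatMap_nil, List.append_nil, pvRoundBlock]
      simp [List.getElem?_eq_getElem hiq]
    | t1 :: t2 :: ts' =>
      have hiq : iq < questions.length := by simp at hq ⊢; omega
      have hrec := ih ts' (iq + 1) (by simp at hlen; omega)
        (by simp at hq ⊢; omega)
      rw [List.drop_eq_getElem_cons hiq]
      simp only [getChatPatternLoop, pvRounds, List.zip_cons_cons, List.flatMap_cons, pvRoundBlock]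
      simp [hrec, List.getElem?_eq_getElem hiq]

-- ===== VERDICT (by name: the statement is the Claim_ definition above) =====
theorem getChatPattern_spec : Claim_equal_getChatPattern := by
  intro questions qa qb texts task _ hpre
  unfold Spec_getChatPattern getChatPattern getChatPattern_alt
  congr 1
  have := loop_eq_rounds questions qa qb texts.length texts 0 le_rfl (by simpa using hpre)
  simpa using this
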